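-- pv_equiv track=rewrite | github.com/dafdaf1234444/swarm | tools/archive/f_stat1_reporting_quality.py | latest_active_lanes
-- ===== SOURCE A (Python) =====
-- ACTIVE_STATUSES = {"CLAIMED", "ACTIVE", "BLOCKED", "READY"}
--
-- def latest_active_lanes(rows: list[dict[str, str]]) -> list[dict[str, str]]:
--     latest_by_lane: dict[str, dict[str, str]] = {}
--     for row in rows:
--         lane = row.get("lane", "").strip()
--         if lane:
--             latest_by_lane[lane] = row
--     active = [row for row in latest_by_lane.values() if row.get("status", "") in ACTIVE_STATUSES]
--     return sorted(active, key=lambda item: item.get("lane", ""))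
-- ===== SOURCE B (Python) =====
-- ACTIVE_STATUSES = {"CLAIMED", "ACTIVE", "BLOCKED", "READY"}
--
-- def _insert_sorted(out, row):
--     # insertion into a list kept sorted by the raw "lane" value
--     key = row.get("lane", "")
--     i = 0
--     while i < len(out) and not key <= out[i].get("lane", ""):
--         i += 1
--     out.insert(i, row)
--
-- def latest_active_lanes(rows):
--     # one fused back-to-front pass: dedup by stripped lane, filter by status,
--     # and keep the output sorted as we go (no dict, no final sorted() pass)
--     out = []
--     seen = set()
--     for row in reversed(rows):
--         lane = row.get("lane", "").strip()
--         if not lane or lane in seen: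
--             continue
--         seen.add(lane)
--         if row.get("status", "") in ACTIVE_STATUSES:
--             _insert_sorted(out, row)
--     return out
-- ===== Notes on version B (the rewrite author's own statement) =====
-- stated objective: alternative
-- what changed: Replaces A's overwriting lane->row dict plus filter plus library sort by one fused back-to-front pass that dedups with a seen-set of stripped lanes, filters by status inline, and maintains the output list sorted by raw lane via insertion (no dict, no final sorted() call).
import Mathlib
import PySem

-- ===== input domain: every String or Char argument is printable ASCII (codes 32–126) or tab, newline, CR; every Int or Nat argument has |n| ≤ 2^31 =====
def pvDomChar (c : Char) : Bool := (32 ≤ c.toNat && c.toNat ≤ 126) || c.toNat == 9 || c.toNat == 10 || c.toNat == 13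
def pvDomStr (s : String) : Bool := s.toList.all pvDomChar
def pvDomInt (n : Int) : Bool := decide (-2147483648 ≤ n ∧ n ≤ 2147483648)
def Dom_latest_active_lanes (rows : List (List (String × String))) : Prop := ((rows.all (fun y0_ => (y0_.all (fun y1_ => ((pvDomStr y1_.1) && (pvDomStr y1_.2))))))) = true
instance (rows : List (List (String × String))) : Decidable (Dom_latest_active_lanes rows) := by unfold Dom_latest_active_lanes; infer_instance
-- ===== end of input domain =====

-- B replaces A's dict+filter+sorted pipeline by one fused back-to-front pass with a seen-set
-- and an insertion-sorted accumulator; same results, similar cost (objective: alternative).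

-- shared helpers: row.get(key, "") and the ACTIVE_STATUSES set
def pvRowGet (row : List (String × String)) (key : String) : String :=
  (PySem.Dict.mk row).getD key ""

def pvActiveStatuses : PySem.Set String :=
  PySem.Set.ofList ["CLAIMED", "ACTIVE", "BLOCKED", "READY"]

-- ===== PORT A =====
def latest_active_lanes (rows : List (List (String × String))) : List (List (String × String)) :=
  let latest_by_lane : PySem.Dict String (List (String × String)) :=
    rows.foldl (fun d row =>
      let lane := PySem.Str.strip (pvRowGet row "lane")
      if lane ≠ "" then d.insert lane row else d) PySem.Dict.empty
  let active := latest_by_lane.values.filter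
    (fun row => pvActiveStatuses.contains (pvRowGet row "status"))
  PySem.List.sorted active (fun item => pvRowGet item "lane") false

-- ===== PORT B =====
-- _insert_sorted: insert row before the first element whose raw lane is ≥ row's raw lane
def pvInsort (row : List (String × String)) :
    List (List (String × String)) → List (List (String × String))
  | [] => [row]
  | y :: ys =>
      if pvRowGet row "lane" ≤ pvRowGet y "lane" then row :: y :: ys
      else y :: pvInsort row ys

-- the fused loop over the reversed row list, threading (seen, out)
def pvScan : List (List (String × String)) → PySem.Set String →
    List (List (String × String)) → List (List (String × String))
  | [], _, out => out
  | row :: rest, seen, out =>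
      let lane := PySem.Str.strip (pvRowGet row "lane")
      if lane = "" ∨ seen.contains lane then pvScan rest seen out
      else pvScan rest (seen.add lane)
        (if pvActiveStatuses.contains (pvRowGet row "status") then pvInsort row out else out)

def latest_active_lanes_alt (rows : List (List (String × String))) : List (List (String × String)) :=
  pvScan rows.reverse PySem.Set.empty []

-- ===== PRECONDITION & SPEC =====
def Spec_latest_active_lanes (rows : List (List (String × String))) (out : List (List (String × String))) : Prop := out = latest_active_lanes_alt rows
instance (rows : List (List (String × String))) (out : List (List (String × String))) : Decidable (Spec_latest_active_lanes rows out) := by unfold Spec_latest_active_lanes; infer_instance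

-- ===== CLAIM (what is proved, stated in full; the proofs are below) =====
def Claim_equal_latest_active_lanes : Prop := ∀ (rows : List (List (String × String))), Dom_latest_active_lanes rows → Spec_latest_active_lanes rows (latest_active_lanes rows)

-- ===== LEMMAS AND PROOFS =====

-- abbreviations used only by the proofs
def pvK (row : List (String × String)) : String := PySem.Str.strip (pvRowGet row "lane")
def pvF (row : List (String × String)) : String := pvRowGet row "lane"
def pvAct (row : List (String × String)) : Bool := pvActiveStatuses.contains (pvRowGet row "status")

-- A's loop body (definitionally the lambda in port A)
def pvStepA (d : PySem.Dict String (List (String × String))) (row : List (String × String)) :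
    PySem.Dict String (List (String × String)) :=
  if pvK row ≠ "" then d.insert (pvK row) row else d

-- the last row of `rows` whose stripped lane is q
def pvLast (rows : List (List (String × String))) (q : String) : Option (List (String × String)) :=
  rows.foldl (fun acc r => if pvK r = q then some r else acc) none

-- the first row of `l` whose stripped lane is q
def pvFirst (q : String) : List (List (String × String)) → Option (List (String × String))
  | [] => none
  | r :: l => if pvK r = q then some r else pvFirst q l

-- proof-side mirror of pvScan's dedup selection (no filtering, no sorting)
def pvPick : List (List (String × String)) → PySem.Set String → List (List (String × String))
  | [], _ => []
  | r :: l, S => if pvK r = "" ∨ S.contains (pvK r) then pvPick l S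
                 else r :: pvPick l (S.add (pvK r))

-- proof-side mirror of pvScan's accumulation
def pvFoldIns (l : List (List (String × String))) (out : List (List (String × String))) :
    List (List (String × String)) :=
  l.foldl (fun o r => if pvAct r then pvInsort r o else o) out

theorem pvLast_foldl (l : List (List (String × String))) (q : String)
    (a : Option (List (String × String))) :
    l.foldl (fun acc r => if pvK r = q then some r else acc) a = (pvLast l q).or a := by
  induction l generalizing a with
  | nil => simp [pvLast]
  | cons x l ih =>
    simp only [pvLast, List.foldl_cons]
    by_cases h : pvK x = q
    · rw [if_pos h, if_pos h, ih (some x)]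
      cases pvLast l q <;> simp [Option.or]
    · rw [if_neg h, if_neg h, ih a]
      rfl

theorem pvLast_cons (x : List (String × String)) (l : List (List (String × String))) (q : String) :
    pvLast (x :: l) q = (pvLast l q).or (if pvK x = q then some x else none) := by
  show List.foldl _ (if pvK x = q then some x else none) l = _
  rw [pvLast_foldl]

theorem pvFirst_append (q : String) (a b : List (List (String × String))) :
    pvFirst q (a ++ b) = (pvFirst q a).or (pvFirst q b) := by
  induction a with
  | nil => simp [pvFirst]
  | cons x a ih =>
    simp only [List.cons_append, pvFirst]
    by_cases h : pvK x = q
    · rw [if_pos h, if_pos h]; rfl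
    · rw [if_neg h, if_neg h, ih]

theorem pvLast_eq_first_reverse (l : List (List (String × String))) (q : String) :
    pvLast l q = pvFirst q l.reverse := by
  induction l with
  | nil => rfl
  | cons x l ih =>
    rw [pvLast_cons, List.reverse_cons, pvFirst_append, ih]
    congr 1

theorem pvFirst_mem (q : String) (l : List (List (String × String))) :
    ∀ v, pvFirst q l = some v → pvK v = q ∧ v ∈ l := by
  induction l with
  | nil => intro v h; simp [pvFirst] at h
  | cons x l ih =>
    intro v h
    simp only [pvFirst] at h
    by_cases hx : pvK x = q
    · rw [if_pos hx] at h
      obtain rfl : x = v := Option.some_inj.mp h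
      exact ⟨hx, by simp⟩
    · rw [if_neg hx] at h
      rcases ih v h with ⟨h1, h2⟩
      exact ⟨h1, List.mem_cons_of_mem _ h2⟩

-- A-side: lookup in the folded dict is the last matching row
theorem pvGetA (l : List (List (String × String)))
    (d : PySem.Dict String (List (String × String))) (q : String) (hq : q ≠ "") :
    (l.foldl pvStepA d).get? q = (pvLast l q).or (d.get? q) := by
  induction l generalizing d with
  | nil => simp [pvLast]
  | cons x l ih =>
    rw [List.foldl_cons, ih, pvLast_cons]
    have hstep : (pvStepA d x).get? q = if pvK x = q then some x else d.get? q := by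
      unfold pvStepA
      by_cases hx : pvK x = ""
      · rw [if_neg (by simp [hx]), if_neg (by rw [hx]; exact fun h => hq h.symm)]
      · rw [if_pos hx, PySem.Dict.get?_insert]
        by_cases h2 : pvK x = q
        · rw [if_pos h2, if_pos h2.symm]
        · rw [if_neg h2, if_neg (fun hh => h2 hh.symm)]
    rw [hstep]
    by_cases h : pvK x = q <;> cases hl : pvLast l q <;> simp [h, Option.or]

theorem pvGetA_blank (l : List (List (String × String)))
    (d : PySem.Dict String (List (String × String))) :
    (l.foldl pvStepA d).get? "" = d.get? "" := by
  induction l generalizing d with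
  | nil => rfl
  | cons x l ih =>
    rw [List.foldl_cons, ih]
    unfold pvStepA
    by_cases hx : pvK x = ""
    · rw [if_neg (by simp [hx])]
    · rw [if_pos hx, PySem.Dict.get?_insert, if_neg (fun h => hx h.symm)]

theorem pvNodupKeysA (l : List (List (String × String)))
    (d : PySem.Dict String (List (String × String))) (h : d.keys.Nodup) :
    (l.foldl pvStepA d).keys.Nodup := by
  induction l generalizing d with
  | nil => exact h
  | cons x l ih =>
    rw [List.foldl_cons]
    apply ih
    unfold pvStepA
    split
    · exact PySem.Dict.nodup_keys_insert _ _ _ h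
    · exact h

theorem pvGetA_some_key (rows : List (List (String × String))) (q : String)
    (v : List (String × String))
    (h : (rows.foldl pvStepA PySem.Dict.empty).get? q = some v) :
    q = pvK v ∧ q ≠ "" ∧ pvLast rows q = some v := by
  by_cases hq : q = ""
  · rw [hq, pvGetA_blank] at h; simp [PySem.Dict.get?_empty] at h
  · rw [pvGetA rows _ q hq, PySem.Dict.get?_empty] at h
    cases hl : pvLast rows q with
    | none => rw [hl] at h; simp [Option.or] at h
    | some w =>
      rw [hl] at h
      have hwv : w = v := by simpa [Option.or] using h
      have hl2 : pvFirst q rows.reverse = some w := by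
        rw [← pvLast_eq_first_reverse]; exact hl
      rcases pvFirst_mem q _ w hl2 with ⟨h1, -⟩
      subst hwv
      exact ⟨h1.symm, hq, rfl⟩

theorem pvMemValuesA (rows : List (List (String × String))) (v : List (String × String)) :
    v ∈ (rows.foldl pvStepA PySem.Dict.empty).values ↔
      (pvK v ≠ "" ∧ pvLast rows (pvK v) = some v) := by
  have hnd := pvNodupKeysA rows PySem.Dict.empty PySem.Dict.nodup_keys_empty
  have hval : (rows.foldl pvStepA PySem.Dict.empty).values
      = (rows.foldl pvStepA PySem.Dict.empty).items.map Prod.snd := rfl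
  constructor
  · intro hv
    rw [hval, List.mem_map] at hv
    rcases hv with ⟨⟨q, w⟩, hp, he⟩
    cases he
    have hg := (PySem.Dict.get?_eq_some_iff_mem_items _ q w hnd).mpr hp
    rcases pvGetA_some_key rows q w hg with ⟨h1, h2, h3⟩
    exact ⟨h1 ▸ h2, h1 ▸ h3⟩
  · rintro ⟨h1, h2⟩
    have hg : (rows.foldl pvStepA PySem.Dict.empty).get? (pvK v) = some v := by
      rw [pvGetA rows _ _ h1, PySem.Dict.get?_empty, h2]
      rfl
    have hp := (PySem.Dict.get?_eq_some_iff_mem_items _ _ v hnd).mp hg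
    rw [hval, List.mem_map]
    exact ⟨(pvK v, v), hp, rfl⟩

theorem pvNodupValuesA (rows : List (List (String × String))) :
    (rows.foldl pvStepA PySem.Dict.empty).values.Nodup := by
  have hnd := pvNodupKeysA rows PySem.Dict.empty PySem.Dict.nodup_keys_empty
  have hitems : (rows.foldl pvStepA PySem.Dict.empty).items.Nodup :=
    List.Nodup.of_map Prod.fst hnd
  have hval : (rows.foldl pvStepA PySem.Dict.empty).values
      = (rows.foldl pvStepA PySem.Dict.empty).items.map Prod.snd := rfl
  rw [hval]
  apply List.Nodup.map_on _ hitems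
  intro p1 hp1 p2 hp2 he
  have h1 := (PySem.Dict.get?_eq_some_iff_mem_items _ p1.1 p1.2 hnd).mpr hp1
  have h2 := (PySem.Dict.get?_eq_some_iff_mem_items _ p2.1 p2.2 hnd).mpr hp2
  rcases pvGetA_some_key rows p1.1 p1.2 h1 with ⟨k1, -, -⟩
  rcases pvGetA_some_key rows p2.1 p2.2 h2 with ⟨k2, -, -⟩
  have hfst : p1.1 = p2.1 := by rw [k1, k2, he]
  cases p1; cases p2
  simp only at hfst he
  rw [hfst, he]

-- B-side: pvScan decomposes into the dedup selection followed by the insertion accumulation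
theorem pvScan_decomp (l : List (List (String × String))) (S : PySem.Set String)
    (out : List (List (String × String))) :
    pvScan l S out = pvFoldIns (pvPick l S) out := by
  induction l generalizing S out with
  | nil => rfl
  | cons x l ih =>
    show (if pvK x = "" ∨ S.contains (pvK x) then pvScan l S out
          else pvScan l (S.add (pvK x)) (if pvAct x then pvInsort x out else out)) = _
    unfold pvPick
    split
    · exact ih S out
    · rw [ih]
      rfl

theorem pvInsort_perm (r : List (String × String)) (l : List (List (String × String))) :
    (pvInsort r l).Perm (r :: l) := by
  induction l with
  | nil => rfl
  | cons y ys ih =>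
    unfold pvInsort
    split
    · rfl
    · exact (List.Perm.cons y ih).trans (List.Perm.swap r y ys)

theorem pvInsort_mem (r v : List (String × String)) (l : List (List (String × String))) :
    v ∈ pvInsort r l ↔ v = r ∨ v ∈ l := by
  rw [(pvInsort_perm r l).mem_iff, List.mem_cons]

theorem pvInsort_sorted (r : List (String × String)) (l : List (List (String × String)))
    (h : l.Pairwise (fun a b => pvF a ≤ pvF b)) :
    (pvInsort r l).Pairwise (fun a b => pvF a ≤ pvF b) := by
  induction l with
  | nil => simp [pvInsort]
  | cons y ys ih =>
    rcases List.pairwise_cons.mp h with ⟨hy, hys⟩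
    unfold pvInsort
    split
    · rename_i hle
      refine List.pairwise_cons.mpr ⟨?_, h⟩
      intro b hb
      rcases List.mem_cons.mp hb with rfl | hb'
      · exact hle
      · exact le_trans hle (hy b hb')
    · rename_i hgt
      refine List.pairwise_cons.mpr ⟨?_, ih hys⟩
      intro b hb
      rcases (pvInsort_mem r b ys).mp hb with rfl | hb'
      · exact le_of_not_ge (by exact_mod_cast hgt)
      · exact hy b hb'

theorem pvFoldIns_perm (l : List (List (String × String)))
    (out : List (List (String × String))) :
    (pvFoldIns l out).Perm (l.filter pvAct ++ out) := by
  induction l generalizing out with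
  | nil => simp [pvFoldIns]
  | cons x l ih =>
    show (pvFoldIns l (if pvAct x then pvInsort x out else out)).Perm _
    by_cases hx : pvAct x
    · rw [if_pos hx, List.filter_cons_of_pos hx]
      exact (ih _).trans (((pvInsort_perm x out).append_left (l.filter pvAct)).trans
        List.perm_middle)
    · rw [if_neg hx, List.filter_cons_of_neg (by simpa using hx)]
      exact ih out

theorem pvFoldIns_sorted (l : List (List (String × String)))
    (out : List (List (String × String)))
    (h : out.Pairwise (fun a b => pvF a ≤ pvF b)) :
    (pvFoldIns l out).Pairwise (fun a b => pvF a ≤ pvF b) := by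
  induction l generalizing out with
  | nil => exact h
  | cons x l ih =>
    show (pvFoldIns l (if pvAct x then pvInsort x out else out)).Pairwise _
    by_cases hx : pvAct x
    · rw [if_pos hx]; exact ih _ (pvInsort_sorted x out h)
    · rw [if_neg hx]; exact ih out h

theorem pvPick_mem (l : List (List (String × String))) (S : PySem.Set String)
    (v : List (String × String)) :
    v ∈ pvPick l S ↔ pvK v ≠ "" ∧ ¬ (S.contains (pvK v) = true) ∧ pvFirst (pvK v) l = some v := by
  induction l generalizing S with
  | nil => simp [pvPick, pvFirst]
  | cons x l ih =>
    unfold pvPick pvFirst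
    by_cases hkx : pvK x = pvK v
    · rw [if_pos hkx]
      by_cases hg : pvK x = "" ∨ S.contains (pvK x)
      · rw [if_pos hg, ih]
        constructor
        · rintro ⟨h1, h2, h3⟩
          rcases pvFirst_mem (pvK v) l v h3 with ⟨-, -⟩
          rcases hg with hg | hg
          · exact absurd (hkx ▸ hg) h1
          · exact absurd (hkx ▸ hg) h2
        · rintro ⟨h1, h2, h3⟩
          obtain rfl : x = v := Option.some_inj.mp h3
          rcases hg with hg | hg
          · exact absurd hg h1
          · exact absurd hg h2
      · rw [if_neg hg]
        push_neg at hg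
        simp only [List.mem_cons]
        constructor
        · rintro (rfl | hv)
          · exact ⟨hkx ▸ hg.1, by rw [← hkx]; simpa using hg.2, rfl⟩
          · rcases (ih _).mp hv with ⟨h1, h2, h3⟩
            exfalso
            apply h2
            rw [PySem.Set.contains_iff, PySem.Set.mem_add]
            right; exact hkx.symm
        · rintro ⟨h1, h2, h3⟩
          left
          exact (Option.some_inj.mp h3).symm
    · rw [if_neg hkx]
      by_cases hg : pvK x = "" ∨ S.contains (pvK x)
      · rw [if_pos hg, ih]
      · rw [if_neg hg]
        simp only [List.mem_cons]
        constructor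
        · rintro (rfl | hv)
          · exact absurd rfl hkx
          · rcases (ih _).mp hv with ⟨h1, h2, h3⟩
            refine ⟨h1, fun hc => h2 ?_, h3⟩
            rw [PySem.Set.contains_iff] at hc ⊢
            rw [PySem.Set.mem_add]
            left; exact hc
        · rintro ⟨h1, h2, h3⟩
          right
          refine (ih _).mpr ⟨h1, fun hc => ?_, h3⟩
          rw [PySem.Set.contains_iff, PySem.Set.mem_add] at hc
          rcases hc with hc | hc
          · exact h2 (by rwa [PySem.Set.contains_iff])
          · exact hkx hc.symm
  
theorem pvPick_keys_nodup (l : List (List (String × String))) (S : PySem.Set String) :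
    ((pvPick l S).map pvK).Nodup := by
  induction l generalizing S with
  | nil => simp [pvPick]
  | cons x l ih =>
    unfold pvPick
    split
    · exact ih S
    · rename_i hg
      push_neg at hg
      simp only [List.map_cons, List.nodup_cons]
      refine ⟨?_, ih _⟩
      intro hc
      rcases List.mem_map.mp hc with ⟨v, hv, hkv⟩
      rcases (pvPick_mem l _ v).mp hv with ⟨-, h2, -⟩
      apply h2
      rw [PySem.Set.contains_iff, PySem.Set.mem_add]
      right; exact hkv

-- ===== VERDICT (by name: the statement is the Claim_ definition above) =====
theorem latest_active_lanes_spec : Claim_equal_latest_active_lanes := by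
  intro rows _
  unfold Spec_latest_active_lanes
  have hA : latest_active_lanes rows =
      PySem.List.sorted ((rows.foldl pvStepA PySem.Dict.empty).values.filter pvAct) pvF false := rfl
  have hB : latest_active_lanes_alt rows =
      pvFoldIns (pvPick rows.reverse PySem.Set.empty) [] := pvScan_decomp _ _ _
  set P := pvPick rows.reverse PySem.Set.empty with hP
  have hPmem : ∀ v, v ∈ P ↔ (pvK v ≠ "" ∧ pvLast rows (pvK v) = some v) := by
    intro v
    rw [hP, pvPick_mem, pvLast_eq_first_reverse]
    constructor
    · rintro ⟨h1, -, h3⟩; exact ⟨h1, h3⟩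
    · rintro ⟨h1, h3⟩
      refine ⟨h1, ?_, h3⟩
      simp [PySem.Set.empty]
  have hnodK : (P.map pvK).Nodup := pvPick_keys_nodup _ _
  have hnodP : P.Nodup := List.Nodup.of_map pvK hnodK
  have hnodA := pvNodupValuesA rows
  have hperm : (rows.foldl pvStepA PySem.Dict.empty).values.Perm P := by
    rw [List.perm_ext_iff_of_nodup hnodA hnodP]
    intro v
    rw [pvMemValuesA, hPmem]
  have hpermF : ((rows.foldl pvStepA PySem.Dict.empty).values.filter pvAct).Perm
      (P.filter pvAct) := hperm.filter pvAct
  set X := pvFoldIns P [] with hX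
  have hXperm : X.Perm ((rows.foldl pvStepA PySem.Dict.empty).values.filter pvAct) := by
    have := pvFoldIns_perm P []
    rw [List.append_nil] at this
    exact this.trans hpermF.symm
  have hle : X.Pairwise (fun a b => pvF a ≤ pvF b) :=
    pvFoldIns_sorted P [] (List.Pairwise.nil)
  have hnodF : ((P.filter pvAct).map pvF).Nodup := by
    have h1 : (P.map pvF).Nodup := by
      have hcomp : P.map pvK = (P.map pvF).map PySem.Str.strip := by
        rw [List.map_map]; rfl
      rw [hcomp] at hnodK
      exact List.Nodup.of_map PySem.Str.strip hnodK
    exact List.Nodup.sublist (List.Sublist.map pvF (P.filter_sublist)) h1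
  have hne : X.Pairwise (fun a b => pvF a ≠ pvF b) := by
    have hXP : X.Perm (P.filter pvAct) := by
      have := pvFoldIns_perm P []
      rw [List.append_nil] at this
      exact this
    have hnd : (X.map pvF).Nodup := (List.Perm.nodup_iff (List.Perm.map pvF hXP)).mpr hnodF
    exact List.pairwise_map.mp hnd
  have hlt : X.Pairwise (fun a b => pvF a < pvF b) :=
    (hle.and hne).imp (fun h => lt_of_le_of_ne h.1 h.2)
  rw [hA, hB]
  exact PySem.List.sorted_eq_of_perm_of_pairwise_lt _ X pvF hXperm hlt
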